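-- pv_equiv track=rewrite | github.com/dmgoodman/MusicGenerator | markov.py | preprocess_firstorder
-- ===== SOURCE A (Python) =====
-- def preprocess_firstorder(notes_list):
--     notesDict = {}
--     for i in range(len(notes_list)):
--         notes = tuple(notes_list[i])
--         prevNotes = tuple([])
--         if i > 0:
--             prevNotes = tuple(notes_list[i - 1])
--
--         # Set notesDict[prevNotes] to empty dictionary if it doesn't exist
--         notesDict[prevNotes] = notesDict.get(prevNotes, {})
--
--         # Set notesDict[prevNotes][notes] to 1 if it doesn't exist
--         notesDict[prevNotes][notes] = notesDict[prevNotes].get(notes, 0) + 1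
--
--     return notesDict
-- ===== SOURCE B (Python) =====
-- def preprocess_firstorder(notes_list):
--     # Pass 1: flat count of (prev, curr) transition pairs.
--     currs = [tuple(n) for n in notes_list]
--     prevs = [()] + currs[:-1]
--     counts = {}
--     for pair in zip(prevs, currs):
--         counts[pair] = counts.get(pair, 0) + 1
--     # Pass 2: assemble the nested dict from the flat table.
--     out = {}
--     for (prev, curr), n in counts.items():
--         out.setdefault(prev, {})[curr] = n
--     return out
-- ===== Notes on version B (the rewrite author's own statement) =====
-- stated objective: alternative
-- what changed: B replaces A's single index loop that grows the nested dict in place with two differently-shaped passes: it zips the shifted prev/curr lists, counts transition pairs into one flat table, and then assembles the nested dict from that table in a second pass.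
import Mathlib
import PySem

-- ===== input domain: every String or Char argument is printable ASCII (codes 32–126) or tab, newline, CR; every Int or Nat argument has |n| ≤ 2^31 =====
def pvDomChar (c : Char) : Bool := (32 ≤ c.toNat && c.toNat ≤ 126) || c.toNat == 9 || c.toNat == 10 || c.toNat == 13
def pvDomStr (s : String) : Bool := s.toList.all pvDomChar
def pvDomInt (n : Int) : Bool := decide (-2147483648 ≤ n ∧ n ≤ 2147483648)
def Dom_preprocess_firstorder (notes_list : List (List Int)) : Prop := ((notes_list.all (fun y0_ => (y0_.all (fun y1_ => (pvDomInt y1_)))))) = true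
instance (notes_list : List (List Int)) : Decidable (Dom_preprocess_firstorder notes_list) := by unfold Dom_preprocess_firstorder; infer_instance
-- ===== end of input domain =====

-- B re-implements A's nested-dict transition counting as two passes (flat pair Counter, then assembly); return values proved equal.


-- ===== PORT A =====
-- literal transliteration of A: one loop over indices, growing the nested dict in place
def preprocess_firstorder (notes_list : List (List Int)) : List (List Int × List (List Int × Int)) :=
  let notesDict : PySem.Dict (List Int) (PySem.Dict (List Int) Int) :=
    (PySem.List.pyRange 0 (notes_list.length : Int) 1).foldl
      (fun notesDict i =>
        let notes : List Int := PySem.List.pyGetD notes_list i []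
        let prevNotes : List Int := if 0 < i then PySem.List.pyGetD notes_list (i - 1) [] else []
        -- notesDict[prevNotes] = notesDict.get(prevNotes, {})
        let notesDict := notesDict.insert prevNotes (notesDict.getD prevNotes PySem.Dict.empty)
        -- notesDict[prevNotes][notes] = notesDict[prevNotes].get(notes, 0) + 1
        notesDict.insert prevNotes
          ((notesDict.getD prevNotes PySem.Dict.empty).insert notes
            ((notesDict.getD prevNotes PySem.Dict.empty).getD notes 0 + 1)))
      PySem.Dict.empty
  notesDict.items.map (fun p => (p.1, p.2.items))

-- ===== PORT B =====
-- literal transliteration of B: zip shifted lists, count pairs flat, then assemble the nested dict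
def preprocess_firstorder_alt (notes_list : List (List Int)) : List (List Int × List (List Int × Int)) :=
  let currs : List (List Int) := notes_list
  let prevs : List (List Int) := [[]] ++ PySem.List.slice currs none (some (-1))
  let counts : PySem.Dict (List Int × List Int) Int :=
    (List.zip prevs currs).foldl
      (fun counts pair => counts.insert pair (counts.getD pair 0 + 1)) PySem.Dict.empty
  let out : PySem.Dict (List Int) (PySem.Dict (List Int) Int) :=
    counts.items.foldl
      (fun out e =>
        -- out.setdefault(prev, {})[curr] = n
        out.modify e.1.1 PySem.Dict.empty (fun inn => inn.insert e.1.2 e.2))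
      PySem.Dict.empty
  out.items.map (fun p => (p.1, p.2.items))

-- ===== PRECONDITION & SPEC =====
def Spec_preprocess_firstorder (notes_list : List (List Int)) (out : List (List Int × List (List Int × Int))) : Prop := out = preprocess_firstorder_alt notes_list
instance (notes_list : List (List Int)) (out : List (List Int × List (List Int × Int))) : Decidable (Spec_preprocess_firstorder notes_list out) := by unfold Spec_preprocess_firstorder; infer_instance

-- ===== CLAIM (what is proved, stated in full; the proofs are below) =====
def Claim_equal_preprocess_firstorder : Prop := ∀ (notes_list : List (List Int)), Dom_preprocess_firstorder notes_list → Spec_preprocess_firstorder notes_list (preprocess_firstorder notes_list)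

-- ===== LEMMAS AND PROOFS =====

abbrev PVND := PySem.Dict (List Int) (PySem.Dict (List Int) Int)
def pvStepA (d : PVND) (x : List Int × List Int) : PVND :=
  d.insert x.1 ((d.getD x.1 PySem.Dict.empty).insert x.2
    ((d.getD x.1 PySem.Dict.empty).getD x.2 0 + 1))
def pvStepB (o : PVND) (e : (List Int × List Int) × Int) : PVND :=
  o.modify e.1.1 PySem.Dict.empty (fun inn => inn.insert e.1.2 e.2)
def pvInner (L : List (List Int × List Int)) (p : List Int) : List (List Int × Int) :=
  (PySem.Set.ofList ((L.filter (fun q => q.1 == p)).map (fun q => q.2))).map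
    (fun c => (c, (L.count (p, c) : Int)))
def pvNested (L : List (List Int × List Int)) : List (List Int × PySem.Dict (List Int) Int) :=
  (PySem.Set.ofList (L.map (fun q => q.1))).map (fun p => (p, PySem.Dict.mk (pvInner L p)))
def pvInnerE (E : List ((List Int × List Int) × Int)) (p : List Int) : List (List Int × Int) :=
  (E.filter (fun e => e.1.1 == p)).map (fun e => (e.1.2, e.2))
def pvNestedE (E : List ((List Int × List Int) × Int)) : List (List Int × PySem.Dict (List Int) Int) :=
  (PySem.Set.ofList (E.map (fun e => e.1.1))).map (fun p => (p, PySem.Dict.mk (pvInnerE E p)))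

theorem pv_ofList_map_ofList {a b : Type} [BEq a] [LawfulBEq a] [BEq b] [LawfulBEq b] (f : a -> b) (l : List a) :
    PySem.Set.ofList ((PySem.Set.ofList l).map f) = PySem.Set.ofList (l.map f) := by
  induction l using List.reverseRecOn with
  | nil => rfl
  | append_singleton l x ih =>
      rw [PySem.Set.ofList_append_singleton, List.map_append, List.map_singleton,
        PySem.Set.ofList_append_singleton]
      by_cases hx : x ∈ l
      · rw [PySem.Set.add_of_mem (by simpa [PySem.Set.mem_ofList] using hx), ih,
          PySem.Set.add_of_mem (by simp [PySem.Set.mem_ofList]; exact ⟨x, hx, rfl⟩)]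
      · rw [PySem.Set.add_of_not_mem (by simpa [PySem.Set.mem_ofList] using hx), List.map_append,
          List.map_singleton, PySem.Set.ofList_append_singleton, ih]

theorem pv_ofList_filter {a : Type} [BEq a] [LawfulBEq a] (q : a -> Bool) (l : List a) :
    (PySem.Set.ofList l).filter q = PySem.Set.ofList (l.filter q) := by
  induction l using List.reverseRecOn with
  | nil => rfl
  | append_singleton l x ih =>
      rw [PySem.Set.ofList_append_singleton, List.filter_append]
      by_cases hx : x ∈ l
      · rw [PySem.Set.add_of_mem (by simpa [PySem.Set.mem_ofList] using hx), ih]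
        by_cases hq : q x
        · simp only [List.filter_singleton, hq, cond_true]
          rw [PySem.Set.ofList_append_singleton,
            PySem.Set.add_of_mem (by simp [PySem.Set.mem_ofList, List.mem_filter]; exact ⟨hx, hq⟩)]
        · simp [hq]
      · rw [PySem.Set.add_of_not_mem (by simpa [PySem.Set.mem_ofList] using hx), List.filter_append,
          ih]
        by_cases hq : q x
        · simp only [List.filter_singleton, hq, cond_true]
          rw [PySem.Set.ofList_append_singleton,
            PySem.Set.add_of_not_mem (by simp [PySem.Set.mem_ofList, List.mem_filter]; intro h; exact absurd h hx)]
        · simp [hq]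

theorem pv_map_ofList_injOn {a b : Type} [BEq a] [LawfulBEq a] [BEq b] [LawfulBEq b] (f : a -> b) (l : List a)
    (hinj : forall x, x ∈ l -> forall y, y ∈ l -> f x = f y -> x = y) :
    (PySem.Set.ofList l).map f = PySem.Set.ofList (l.map f) := by
  induction l using List.reverseRecOn with
  | nil => rfl
  | append_singleton l x ih =>
      have hinj' : forall x', x' ∈ l -> forall y, y ∈ l -> f x' = f y -> x' = y := by
        intro p hp q hq; exact hinj p (by simp [hp]) q (by simp [hq])
      rw [PySem.Set.ofList_append_singleton, List.map_append, List.map_singleton,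
        PySem.Set.ofList_append_singleton]
      by_cases hx : x ∈ l
      · rw [PySem.Set.add_of_mem (by simpa [PySem.Set.mem_ofList] using hx), ih hinj',
          PySem.Set.add_of_mem (by simp [PySem.Set.mem_ofList]; exact ⟨x, hx, rfl⟩)]
      · rw [PySem.Set.add_of_not_mem (by simpa [PySem.Set.mem_ofList] using hx), List.map_append,
          List.map_singleton, ih hinj',
          PySem.Set.add_of_not_mem (by
            simp only [PySem.Set.mem_ofList, List.mem_map]
            rintro ⟨y, hy, hfy⟩
            exact hx (hinj y (by simp [hy]) x (by simp) hfy ▸ hy))]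

theorem pv_assem_step (E : List ((List Int × List Int) × Int)) (e : (List Int × List Int) × Int)
    (hk : e.1 ∉ E.map (fun e => e.1)) :
    pvStepB (PySem.Dict.mk (pvNestedE E)) e = PySem.Dict.mk (pvNestedE (E ++ [e])) := by
  have hkeys : (PySem.Dict.mk (pvNestedE E)).keys = PySem.Set.ofList (E.map (fun e => e.1.1)) := by
    simp [pvNestedE, PySem.Dict.keys_mk, List.map_map, Function.comp_def]
  have hnodup : (PySem.Dict.mk (pvNestedE E)).keys.Nodup := by
    rw [hkeys]; exact PySem.Set.nodup_ofList _
  have hcont : (PySem.Dict.mk (pvNestedE E)).contains e.1.1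
      = decide (e.1.1 ∈ E.map (fun e => e.1.1)) := by
    rw [PySem.Dict.contains_eq_decide_mem_keys, hkeys]
    simp [PySem.Set.mem_ofList]
  have hstep : pvStepB (PySem.Dict.mk (pvNestedE E)) e
      = (PySem.Dict.mk (pvNestedE E)).insert e.1.1
          (((PySem.Dict.mk (pvNestedE E)).getD e.1.1 PySem.Dict.empty).insert e.1.2 e.2) := rfl
  by_cases hp : e.1.1 ∈ E.map (fun e => e.1.1)
  · -- outer key already present
    have hmem : (e.1.1, PySem.Dict.mk (pvInnerE E e.1.1)) ∈ (PySem.Dict.mk (pvNestedE E)).items :=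
      List.mem_map.2 ⟨e.1.1, (PySem.Set.mem_ofList _ _).2 hp, rfl⟩
    have hgetD : (PySem.Dict.mk (pvNestedE E)).getD e.1.1 PySem.Dict.empty
        = PySem.Dict.mk (pvInnerE E e.1.1) :=
      PySem.Dict.getD_of_mem_items _ hmem hnodup _
    have hcnot : (PySem.Dict.mk (pvInnerE E e.1.1)).contains e.1.2 = false := by
      rw [PySem.Dict.contains_eq_decide_mem_keys]
      simp only [decide_eq_false_iff_not, PySem.Dict.keys_mk, pvInnerE, List.map_map]
      intro hmem2
      obtain ⟨q, hq, hq2⟩ := List.mem_map.1 hmem2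
      obtain ⟨hqE, hq1⟩ := List.mem_filter.1 hq
      refine hk (List.mem_map.2 ⟨q, hqE, ?_⟩)
      have h1 : q.1.1 = e.1.1 := by simpa using hq1
      have h2 : q.1.2 = e.1.2 := by simpa using hq2
      exact Prod.ext h1 h2
    have hval : (PySem.Dict.mk (pvInnerE E e.1.1)).insert e.1.2 e.2
        = PySem.Dict.mk (pvInnerE (E ++ [e]) e.1.1) := by
      apply PySem.Dict.ext
      rw [PySem.Dict.items_insert_of_not_contains _ _ hcnot]
      simp [pvInnerE, List.filter_append]
    rw [hstep, hgetD, hval]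
    apply PySem.Dict.ext
    rw [PySem.Dict.items_insert_of_contains _ _ (by rw [hcont]; simpa using hp)]
    show (pvNestedE E).map _ = pvNestedE (E ++ [e])
    rw [pvNestedE, List.map_map]
    rw [show pvNestedE (E ++ [e])
        = (PySem.Set.ofList (E.map (fun e => e.1.1))).map
            (fun p => (p, PySem.Dict.mk (pvInnerE (E ++ [e]) p))) from by
      rw [pvNestedE, List.map_append]
      simp only [List.map_cons, List.map_nil]
      rw [PySem.Set.ofList_append_singleton, PySem.Set.add_of_mem (by simpa [PySem.Set.mem_ofList] using hp)]]
    apply List.map_congr_left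
    intro p' hp'
    by_cases hpe : p' = e.1.1
    · subst hpe
      simp only [Function.comp_def, beq_self_eq_true, if_pos]
    · simp only [Function.comp_def, beq_iff_eq, hpe, if_false]
      have : pvInnerE (E ++ [e]) p' = pvInnerE E p' := by
        rw [pvInnerE, pvInnerE, List.filter_append]
        simp [show (e.1.1 == p') = false from by simp [Ne.symm hpe, BEq.symm_false]]
      rw [this]
  · -- fresh outer key
    have hgetD : (PySem.Dict.mk (pvNestedE E)).getD e.1.1 PySem.Dict.empty = PySem.Dict.empty :=
      PySem.Dict.getD_of_not_contains _ _ (by rw [hcont]; simpa using hp)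
    have hfilter : E.filter (fun q => q.1.1 == e.1.1) = [] := by
      rw [List.filter_eq_nil_iff]
      intro q hq
      simp only [beq_iff_eq]
      exact fun h => hp (List.mem_map.2 ⟨q, hq, h⟩)
    rw [hstep, hgetD]
    apply PySem.Dict.ext
    rw [PySem.Dict.items_insert_of_not_contains _ _ (by rw [hcont]; simpa using hp)]
    show pvNestedE E ++ [(e.1.1, _)] = pvNestedE (E ++ [e])
    rw [show (PySem.Dict.empty.insert e.1.2 e.2 : PySem.Dict (List Int) Int)
        = PySem.Dict.mk (pvInnerE (E ++ [e]) e.1.1) from by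
      apply PySem.Dict.ext
      rw [PySem.Dict.items_insert_of_not_contains _ _ (PySem.Dict.contains_empty _)]
      simp [pvInnerE, List.filter_append, hfilter, PySem.Dict.empty]]
    rw [pvNestedE, pvNestedE, List.map_append]
    simp only [List.map_cons, List.map_nil]
    rw [PySem.Set.ofList_append_singleton, PySem.Set.add_of_not_mem (by simpa [PySem.Set.mem_ofList] using hp), List.map_append]
    congr 1
    apply List.map_congr_left
    intro p' hp'
    have hpe : p' ≠ e.1.1 := by
      intro h; subst h
      exact hp (by simpa [PySem.Set.mem_ofList] using hp')
    have : pvInnerE (E ++ [e]) p' = pvInnerE E p' := by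
      rw [pvInnerE, pvInnerE, List.filter_append]
      simp [show (e.1.1 == p') = false from by simp [Ne.symm hpe]]
    rw [this]

theorem pv_count_append_ne (L : List (List Int × List Int)) (x y : List Int × List Int)
    (h : y ≠ x) : (L ++ [x]).count y = L.count y := by
  simp [List.count_append, show ¬x = y from fun hh => h hh.symm]

theorem pv_inner_append_ne (L : List (List Int × List Int)) (x : List Int × List Int)
    (p' : List Int) (h : p' ≠ x.1) : pvInner (L ++ [x]) p' = pvInner L p' := by
  rw [pvInner, pvInner, List.filter_append]
  have hflt : List.filter (fun q => q.1 == p') [x] = [] := by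
    simp [show (x.1 == p') = false from by simp [Ne.symm h]]
  rw [hflt, List.append_nil]
  apply List.map_congr_left
  intro c hc
  rw [pv_count_append_ne L x (p', c) (fun hcon => h (by rw [← hcon]))]

theorem pv_build_step (L : List (List Int × List Int)) (x : List Int × List Int) :
    pvStepA (PySem.Dict.mk (pvNested L)) x = PySem.Dict.mk (pvNested (L ++ [x])) := by
  have hkeys : (PySem.Dict.mk (pvNested L)).keys = PySem.Set.ofList (L.map (fun q => q.1)) := by
    simp [pvNested, PySem.Dict.keys_mk, List.map_map, Function.comp_def]
  have hnodup : (PySem.Dict.mk (pvNested L)).keys.Nodup := by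
    rw [hkeys]; exact PySem.Set.nodup_ofList _
  have hcont : (PySem.Dict.mk (pvNested L)).contains x.1
      = decide (x.1 ∈ L.map (fun q => q.1)) := by
    rw [PySem.Dict.contains_eq_decide_mem_keys, hkeys]
    simp [PySem.Set.mem_ofList]
  have houter : pvNested (L ++ [x])
      = (PySem.Set.ofList (L.map (fun q => q.1) ++ [x.1])).map
          (fun p => (p, PySem.Dict.mk (pvInner (L ++ [x]) p))) := by
    rw [pvNested, List.map_append]
    simp only [List.map_cons, List.map_nil]
  by_cases hp : x.1 ∈ L.map (fun q => q.1)
  · have hmem : (x.1, PySem.Dict.mk (pvInner L x.1)) ∈ (PySem.Dict.mk (pvNested L)).items :=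
      List.mem_map.2 ⟨x.1, (PySem.Set.mem_ofList _ _).2 hp, rfl⟩
    have hgetD : (PySem.Dict.mk (pvNested L)).getD x.1 PySem.Dict.empty
        = PySem.Dict.mk (pvInner L x.1) :=
      PySem.Dict.getD_of_mem_items _ hmem hnodup _
    have hinkeys : (PySem.Dict.mk (pvInner L x.1)).keys
        = PySem.Set.ofList ((L.filter (fun q => q.1 == x.1)).map (fun q => q.2)) := by
      simp [pvInner, PySem.Dict.keys_mk, List.map_map, Function.comp_def]
    have hinnodup : (PySem.Dict.mk (pvInner L x.1)).keys.Nodup := by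
      rw [hinkeys]; exact PySem.Set.nodup_ofList _
    have hincont : (PySem.Dict.mk (pvInner L x.1)).contains x.2
        = decide (x ∈ L) := by
      rw [PySem.Dict.contains_eq_decide_mem_keys, hinkeys]
      simp only [PySem.Set.mem_ofList, decide_eq_decide]
      constructor
      · rintro hm
        obtain ⟨q, hq, hq2⟩ := List.mem_map.1 hm
        obtain ⟨hqL, hq1⟩ := List.mem_filter.1 hq
        have h1 : q.1 = x.1 := by simpa using hq1
        have : q = x := Prod.ext h1 hq2
        exact this ▸ hqL
      · intro hm
        exact List.mem_map.2 ⟨x, List.mem_filter.2 ⟨hm, by simp⟩, rfl⟩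
    have hfx : List.filter (fun q => q.1 == x.1) (L ++ [x])
        = List.filter (fun q => q.1 == x.1) L ++ [x] := by
      simp [List.filter_append]
    by_cases hc : x ∈ L
    · -- both outer and inner key exist: inner value is overwritten in place
      have hinmem : (x.2, (L.count x : Int)) ∈ (PySem.Dict.mk (pvInner L x.1)).items := by
        refine List.mem_map.2 ⟨x.2, (PySem.Set.mem_ofList _ _).2
          (List.mem_map.2 ⟨x, List.mem_filter.2 ⟨hc, by simp⟩, rfl⟩), ?_⟩
        simp
      have hingetD : (PySem.Dict.mk (pvInner L x.1)).getD x.2 0 = (L.count x : Int) :=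
        PySem.Dict.getD_of_mem_items _ hinmem hinnodup _
      have hval : (PySem.Dict.mk (pvInner L x.1)).insert x.2
            ((PySem.Dict.mk (pvInner L x.1)).getD x.2 0 + 1)
          = PySem.Dict.mk (pvInner (L ++ [x]) x.1) := by
        apply PySem.Dict.ext
        rw [hingetD, PySem.Dict.items_insert_of_contains _ _ (by rw [hincont]; simpa using hc)]
        show (pvInner L x.1).map _ = pvInner (L ++ [x]) x.1
        rw [pvInner, pvInner, List.map_map, hfx, List.map_append]
        simp only [List.map_cons, List.map_nil]
        rw [PySem.Set.ofList_append_singleton, PySem.Set.add_of_mem (by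
          simp only [PySem.Set.mem_ofList]
          exact List.mem_map.2 ⟨x, List.mem_filter.2 ⟨hc, by simp⟩, rfl⟩)]
        apply List.map_congr_left
        intro c' hc'
        by_cases hce : c' = x.2
        · subst hce
          simp [List.count_append]
        · simp only [Function.comp_def, beq_iff_eq, hce, if_false]
          rw [pv_count_append_ne L x (x.1, c') (fun hh => hce (congrArg Prod.snd hh))]
      rw [pvStepA, hgetD, hval]
      apply PySem.Dict.ext
      rw [PySem.Dict.items_insert_of_contains _ _ (by rw [hcont]; simpa using hp)]
      show (pvNested L).map _ = pvNested (L ++ [x])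
      rw [houter, PySem.Set.ofList_append_singleton,
        PySem.Set.add_of_mem (by simpa [PySem.Set.mem_ofList] using hp),
        pvNested, List.map_map]
      apply List.map_congr_left
      intro p' hp'
      by_cases hpe : p' = x.1
      · subst hpe
        simp only [Function.comp_def, beq_self_eq_true, if_pos]
      · simp only [Function.comp_def, beq_iff_eq, hpe, if_false]
        rw [pv_inner_append_ne L x p' hpe]
    · -- outer key exists, inner key is new: appended to the inner dict
      have hincont' : (PySem.Dict.mk (pvInner L x.1)).contains x.2 = false := by
        rw [hincont]; simpa using hc
      have hval : (PySem.Dict.mk (pvInner L x.1)).insert x.2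
            ((PySem.Dict.mk (pvInner L x.1)).getD x.2 0 + 1)
          = PySem.Dict.mk (pvInner (L ++ [x]) x.1) := by
        apply PySem.Dict.ext
        rw [PySem.Dict.getD_of_not_contains _ _ hincont',
          PySem.Dict.items_insert_of_not_contains _ _ hincont']
        show pvInner L x.1 ++ [(x.2, 0 + 1)] = pvInner (L ++ [x]) x.1
        have hxnotin : x.2 ∉ (L.filter (fun q => q.1 == x.1)).map (fun q => q.2) := by
          intro hm
          obtain ⟨q, hq, hq2⟩ := List.mem_map.1 hm
          obtain ⟨hqL, hq1⟩ := List.mem_filter.1 hq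
          exact hc ((Prod.ext (by simpa using hq1) hq2) ▸ hqL)
        rw [pvInner, pvInner, hfx, List.map_append]
        simp only [List.map_cons, List.map_nil]
        rw [PySem.Set.ofList_append_singleton, PySem.Set.add_of_not_mem (by
          simpa [PySem.Set.mem_ofList] using hxnotin), List.map_append]
        congr 1
        · apply List.map_congr_left
          intro c' hc'
          have hce : c' ≠ x.2 := by
            intro h; subst h
            exact hxnotin (by simpa [PySem.Set.mem_ofList] using hc')
          rw [pv_count_append_ne L x (x.1, c') (fun hh => hce (congrArg Prod.snd hh))]
        · simp [List.count_append, List.count_eq_zero.2 hc, Prod.mk.eta]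
      rw [pvStepA, hgetD, hval]
      apply PySem.Dict.ext
      rw [PySem.Dict.items_insert_of_contains _ _ (by rw [hcont]; simpa using hp)]
      show (pvNested L).map _ = pvNested (L ++ [x])
      rw [houter, PySem.Set.ofList_append_singleton,
        PySem.Set.add_of_mem (by simpa [PySem.Set.mem_ofList] using hp),
        pvNested, List.map_map]
      apply List.map_congr_left
      intro p' hp'
      by_cases hpe : p' = x.1
      · subst hpe
        simp only [Function.comp_def, beq_self_eq_true, if_pos]
      · simp only [Function.comp_def, beq_iff_eq, hpe, if_false]
        rw [pv_inner_append_ne L x p' hpe]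
  · -- fresh outer key: appended to the outer dict
    have hcont' : (PySem.Dict.mk (pvNested L)).contains x.1 = false := by
      rw [hcont]; simpa using hp
    have hfilter : List.filter (fun q => q.1 == x.1) L = [] := by
      rw [List.filter_eq_nil_iff]
      intro q hq
      simp only [beq_iff_eq]
      exact fun h => hp (List.mem_map.2 ⟨q, hq, h⟩)
    have hcL : x ∉ L := fun h => hp (List.mem_map.2 ⟨x, h, rfl⟩)
    have hval : (PySem.Dict.empty.insert x.2 (PySem.Dict.empty.getD x.2 0 + 1)
          : PySem.Dict (List Int) Int)
        = PySem.Dict.mk (pvInner (L ++ [x]) x.1) := by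
      apply PySem.Dict.ext
      rw [PySem.Dict.getD_of_not_contains _ _ (PySem.Dict.contains_empty _),
        PySem.Dict.items_insert_of_not_contains _ _ (PySem.Dict.contains_empty _)]
      rw [pvInner, List.filter_append, hfilter]
      have hof : PySem.Set.ofList [x.2] = [x.2] := rfl
      simp [hof, List.count_singleton, Prod.mk.eta, List.count_eq_zero.2 hcL, PySem.Dict.empty]
    rw [pvStepA, PySem.Dict.getD_of_not_contains _ _ hcont', hval]
    apply PySem.Dict.ext
    rw [PySem.Dict.items_insert_of_not_contains _ _ hcont']
    show pvNested L ++ [(x.1, _)] = pvNested (L ++ [x])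
    rw [houter, PySem.Set.ofList_append_singleton,
      PySem.Set.add_of_not_mem (by simpa [PySem.Set.mem_ofList] using hp),
      List.map_append, pvNested]
    congr 1
    apply List.map_congr_left
    intro p' hp'
    have hpe : p' ≠ x.1 := by
      intro h; subst h
      exact hp (by simpa [PySem.Set.mem_ofList] using hp')
    rw [pv_inner_append_ne L x p' hpe]

theorem pv_counterE (L : List (List Int × List Int)) :
    pvNestedE ((PySem.Set.ofList L).map (fun k => (k, (L.count k : Int)))) = pvNested L := by
  rw [pvNestedE, pvNested]
  have houter : (((PySem.Set.ofList L).map (fun k => (k, (L.count k : Int)))).map (fun e => e.1.1))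
      = (PySem.Set.ofList L).map (fun q => q.1) := by
    simp [List.map_map, Function.comp_def]
  rw [houter, pv_ofList_map_ofList]
  apply List.map_congr_left
  intro p hp
  have hin : pvInnerE ((PySem.Set.ofList L).map (fun k => (k, (L.count k : Int)))) p
      = pvInner L p := by
    rw [pvInnerE, List.filter_map, List.map_map]
    have hpred : ((fun e : (List Int × List Int) × Int => e.1.1 == p)
        ∘ (fun k : List Int × List Int => (k, (L.count k : Int)))) = fun k => k.1 == p := rfl
    rw [hpred, pv_ofList_filter]
    have hcongr : ∀ k ∈ PySem.Set.ofList (L.filter (fun q => q.1 == p)),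
        (((fun e : (List Int × List Int) × Int => (e.1.2, e.2))
          ∘ (fun k : List Int × List Int => (k, (L.count k : Int)))) k)
          = ((fun c => (c, (L.count (p, c) : Int))) ∘ (fun q : List Int × List Int => q.2)) k := by
      intro k hk
      have hk' : k ∈ L.filter (fun q => q.1 == p) := (PySem.Set.mem_ofList _ _).1 hk
      have hk1 : k.1 = p := by simpa using (List.mem_filter.1 hk').2
      simp only [Function.comp_def]
      rw [show (p, k.2) = k from Prod.ext hk1.symm rfl]
    rw [List.map_congr_left hcongr, ← List.map_map]
    rw [pv_map_ofList_injOn (fun q : List Int × List Int => q.2) (L.filter (fun q => q.1 == p))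
      (by
        intro a ha b hb hab
        have ha1 : a.1 = p := by simpa using (List.mem_filter.1 ha).2
        have hb1 : b.1 = p := by simpa using (List.mem_filter.1 hb).2
        exact Prod.ext (ha1.trans hb1.symm) hab)]
    rfl
  rw [hin]

theorem pv_loopA (l : List (List Int)) : ∀ init : PVND,
    (PySem.List.pyRange 0 (l.length : Int) 1).foldl
      (fun d i => pvStepA d
        ((if 0 < i then PySem.List.pyGetD l (i - 1) [] else []), PySem.List.pyGetD l i [])) init
      = (List.zip ([] :: l.dropLast) l).foldl pvStepA init := by
  induction l using List.reverseRecOn with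
  | nil => intro init; rfl
  | append_singleton t x ih =>
      intro init
      have hlen : (((t ++ [x]).length : Nat) : Int) = (t.length : Int) + 1 := by
        simp
      rw [hlen, PySem.List.pyRange_one_succ_right (by positivity), List.foldl_append]
      have hpre : (PySem.List.pyRange 0 (t.length : Int) 1).foldl
          (fun d i => pvStepA d
            ((if 0 < i then PySem.List.pyGetD (t ++ [x]) (i - 1) [] else []),
              PySem.List.pyGetD (t ++ [x]) i [])) init
          = (PySem.List.pyRange 0 (t.length : Int) 1).foldl
          (fun d i => pvStepA d
            ((if 0 < i then PySem.List.pyGetD t (i - 1) [] else []),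
              PySem.List.pyGetD t i [])) init := by
        apply PySem.List.foldl_congr_mem
        intro acc i hi
        obtain ⟨h0, h1⟩ := (PySem.List.mem_pyRange_one).1 hi
        have hcur : PySem.List.pyGetD (t ++ [x]) i [] = PySem.List.pyGetD t i [] := by
          rw [PySem.List.pyGetD_eq_getElem _ _ h0 (by simp; omega),
            PySem.List.pyGetD_eq_getElem _ _ h0 (by omega)]
          exact List.getElem_append_left (by omega)
        by_cases hip : 0 < i
        · have hprev : PySem.List.pyGetD (t ++ [x]) (i - 1) [] = PySem.List.pyGetD t (i - 1) [] := by
            rw [PySem.List.pyGetD_eq_getElem _ _ (by omega) (by simp; omega),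
              PySem.List.pyGetD_eq_getElem _ _ (by omega) (by omega)]
            exact List.getElem_append_left (by omega)
          simp only [hip, if_pos, hcur, hprev]
        · simp only [hip, if_false, hcur]
      rw [hpre, ih]
      simp only [List.foldl_cons, List.foldl_nil]
      by_cases ht : t = []
      · subst ht
        rfl
      · have hn : 0 < t.length := List.length_pos_iff.2 ht
        have hcur : PySem.List.pyGetD (t ++ [x]) (t.length : Int) [] = x := by
          rw [PySem.List.pyGetD_eq_getElem _ _ (by positivity) (by simp)]
          simp
        have hprev : PySem.List.pyGetD (t ++ [x]) ((t.length : Int) - 1) [] = t.getLast ht := by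
          rw [PySem.List.pyGetD_eq_getElem _ _ (by omega)
            (by simp only [List.length_append, List.length_cons, List.length_nil]; omega)]
          rw [List.getElem_append_left (by omega)]
          rw [List.getLast_eq_getElem ht]
          congr 1
          omega
        have hzip : List.zip ([] :: (t ++ [x]).dropLast) (t ++ [x])
            = List.zip ([] :: t.dropLast) t ++ [(t.getLast ht, x)] := by
          rw [List.dropLast_concat]
          conv_lhs => rw [show ([] :: t : List (List Int))
            = ([] :: (t.dropLast ++ [t.getLast ht]) : List (List Int)) from by
              rw [List.dropLast_concat_getLast ht]]
          rw [show ([] :: (t.dropLast ++ [t.getLast ht]) : List (List Int))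
            = ([] :: t.dropLast) ++ [t.getLast ht] from rfl]
          rw [List.zip_append (by simp [List.length_dropLast]; omega)]
          rfl
        rw [hzip, List.foldl_append]
        simp only [List.foldl_cons, List.foldl_nil]
        simp only [if_pos (show (0 : Int) < (t.length : Int) from by exact_mod_cast hn), hcur, hprev]

theorem pv_collapse (d : PVND) (p c : List Int) :
    ((d.insert p (d.getD p PySem.Dict.empty)).insert p
      (((d.insert p (d.getD p PySem.Dict.empty)).getD p PySem.Dict.empty).insert c
        (((d.insert p (d.getD p PySem.Dict.empty)).getD p PySem.Dict.empty).getD c 0 + 1)))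
      = pvStepA d (p, c) := by
  simp [pvStepA, PySem.Dict.getD_insert_self, PySem.Dict.insert_insert_self]

theorem pv_build (L : List (List Int × List Int)) :
    L.foldl pvStepA PySem.Dict.empty = PySem.Dict.mk (pvNested L) := by
  induction L using List.reverseRecOn with
  | nil => rfl
  | append_singleton l x ih =>
      rw [List.foldl_append, ih, List.foldl_cons, List.foldl_nil, pv_build_step]

theorem pv_assem (E : List ((List Int × List Int) × Int)) (hnd : (E.map (fun e => e.1)).Nodup) :
    E.foldl pvStepB PySem.Dict.empty = PySem.Dict.mk (pvNestedE E) := by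
  induction E using List.reverseRecOn with
  | nil => rfl
  | append_singleton l e ih =>
      rw [List.map_append, List.nodup_append] at hnd
      rw [List.foldl_append, ih hnd.1, List.foldl_cons, List.foldl_nil, pv_assem_step]
      intro hm
      exact hnd.2.2 e.1 hm e.1 (by simp) rfl

-- ===== VERDICT (by name: the statement is the Claim_ definition above) =====
theorem preprocess_firstorder_spec : Claim_equal_preprocess_firstorder := by
  intro l _
  show preprocess_firstorder l = preprocess_firstorder_alt l
  simp only [preprocess_firstorder, preprocess_firstorder_alt, PySem.List.slice_to_neg_one]
  have hbody : (fun (notesDict : PVND) (i : Int) =>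
      (notesDict.insert (if 0 < i then PySem.List.pyGetD l (i - 1) [] else [])
        (notesDict.getD (if 0 < i then PySem.List.pyGetD l (i - 1) [] else []) PySem.Dict.empty)).insert
        (if 0 < i then PySem.List.pyGetD l (i - 1) [] else [])
        (((notesDict.insert (if 0 < i then PySem.List.pyGetD l (i - 1) [] else [])
          (notesDict.getD (if 0 < i then PySem.List.pyGetD l (i - 1) [] else []) PySem.Dict.empty)).getD
            (if 0 < i then PySem.List.pyGetD l (i - 1) [] else []) PySem.Dict.empty).insert
          (PySem.List.pyGetD l i [])
          (((notesDict.insert (if 0 < i then PySem.List.pyGetD l (i - 1) [] else [])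
            (notesDict.getD (if 0 < i then PySem.List.pyGetD l (i - 1) [] else []) PySem.Dict.empty)).getD
              (if 0 < i then PySem.List.pyGetD l (i - 1) [] else []) PySem.Dict.empty).getD
            (PySem.List.pyGetD l i []) 0 + 1)))
      = (fun (d : PVND) (i : Int) => pvStepA d
          ((if 0 < i then PySem.List.pyGetD l (i - 1) [] else []), PySem.List.pyGetD l i [])) := by
    funext d i
    exact pv_collapse d _ _
  rw [hbody, pv_loopA, pv_build]
  rw [show ([[]] ++ l.dropLast : List (List Int)) = [] :: l.dropLast from rfl]
  rw [PySem.Dict.foldl_insert_getD_add_one_eq_counter, PySem.Dict.items_counter]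
  rw [show (fun (out : PVND) (e : (List Int × List Int) × Int) =>
      out.modify e.1.1 PySem.Dict.empty fun inn => inn.insert e.1.2 e.2) = pvStepB from rfl]
  rw [pv_assem _ (by
    simp [List.map_map, Function.comp_def, PySem.Set.nodup_ofList]), pv_counterE]
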